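-- pv_equiv track=rewrite | github.com/deliawolf/ACI-tollkit | ACI Endpoint/create_report.py | get_cep_dn_from_ip_dn
-- ===== SOURCE A (Python) =====
-- def get_cep_dn_from_ip_dn(ip_dn: str) -> str:
--     """Extract the CEP DN from an IP DN by removing the IP part"""
--     # IP DN format: .../cep-XX:XX:XX:XX:XX:XX/ip-[x.x.x.x]
--     # We want to keep everything up to and including the cep part
--     parts = ip_dn.split('/')
--     cep_index = -1
--     for i, part in enumerate(parts):
--         if part.startswith('cep-'):
--             cep_index = i
--             break
--
--     if cep_index >= 0:
--         return '/'.join(parts[:cep_index + 1])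
--     return ''
-- ===== SOURCE B (Python) =====
-- def get_cep_dn_from_ip_dn(ip_dn: str) -> str:
--     """Extract the CEP DN from an IP DN by removing the IP part"""
--     # Pointer-style scan: walk the string segment by segment instead of
--     # building a parts list and re-joining it.
--     prefix = ''
--     rest = ip_dn
--     while True:
--         if rest.startswith('cep-'):
--             k = rest.find('/')
--             return prefix + (rest if k == -1 else rest[:k])
--         k = rest.find('/')
--         if k == -1:
--             return ''
--         prefix += rest[:k + 1]
--         rest = rest[k + 1:]
-- ===== Notes on version B (the rewrite author's own statement) =====
-- stated objective: alternative
-- what changed: Replaces A's split-into-a-parts-list / enumerate / join-back pipeline by a pointer-style scan that walks the string segment by segment with startswith/find/slicing and never materialises the parts list.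
import Mathlib
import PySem

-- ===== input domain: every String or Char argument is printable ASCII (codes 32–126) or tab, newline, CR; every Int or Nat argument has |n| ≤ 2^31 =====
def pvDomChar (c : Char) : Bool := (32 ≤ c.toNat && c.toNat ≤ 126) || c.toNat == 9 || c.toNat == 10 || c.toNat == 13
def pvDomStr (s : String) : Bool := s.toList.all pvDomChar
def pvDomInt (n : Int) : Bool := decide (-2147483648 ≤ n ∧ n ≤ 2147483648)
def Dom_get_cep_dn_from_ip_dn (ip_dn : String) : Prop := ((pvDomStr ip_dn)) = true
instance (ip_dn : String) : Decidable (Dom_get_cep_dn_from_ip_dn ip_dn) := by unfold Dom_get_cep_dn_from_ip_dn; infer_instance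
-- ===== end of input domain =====

-- B replaces A's split-into-parts / join-back pipeline by a pointer-style scan that walks
-- the string segment by segment (startswith / find / slice) — alternative, no speed claim.

-- ===== PORT A =====
-- A's 'for i, part in enumerate(parts): if part.startswith("cep-"): cep_index = i; break'
def pvALoop (parts : List (List Char)) (i : Int) : Int :=
  match parts with
  | [] => -1
  | p :: ps => if PySem.Chars.startswith p ['c', 'e', 'p', '-'] then i else pvALoop ps (i + 1)

def get_cep_dn_from_ip_dn (ip_dn : String) : String :=
  let parts := PySem.Chars.splitOn ip_dn.toList ['/']
  let cep_index := pvALoop parts 0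
  if 0 ≤ cep_index then
    String.mk (PySem.Chars.join ['/'] (parts.take (cep_index.toNat + 1)))
  else ""

-- ===== PORT B =====
-- B's 'while True' loop: prefix accumulates the consumed part (incl. trailing '/'), rest shrinks
def pvBGo (pre rest : List Char) : List Char :=
  if PySem.Chars.startswith rest ['c', 'e', 'p', '-'] then
    let k := PySem.Chars.find rest ['/']
    pre ++ (if k = -1 then rest else rest.take k.toNat)
  else
    let k := PySem.Chars.find rest ['/']
    if h : k = -1 then []
    else pvBGo (pre ++ rest.take (k.toNat + 1)) (rest.drop (k.toNat + 1))
termination_by rest.length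
decreasing_by
  have h0 : 0 ≤ PySem.Chars.find rest ['/'] := by
    have := PySem.Chars.neg_one_le_find rest ['/']; omega
  have hpre := (PySem.Chars.find_spec h0).1
  have hlen : 1 ≤ (rest.drop (PySem.Chars.find rest ['/']).toNat).length :=
    le_trans (by simp) hpre.length_le
  simp only [List.length_drop] at *
  omega

def get_cep_dn_from_ip_dn_alt (ip_dn : String) : String :=
  String.mk (pvBGo [] ip_dn.toList)

-- ===== PRECONDITION & SPEC =====
def Spec_get_cep_dn_from_ip_dn (ip_dn : String) (out : String) : Prop := out = get_cep_dn_from_ip_dn_alt ip_dn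
instance (ip_dn : String) (out : String) : Decidable (Spec_get_cep_dn_from_ip_dn ip_dn out) := by unfold Spec_get_cep_dn_from_ip_dn; infer_instance

-- ===== CLAIM (what is proved, stated in full; the proofs are below) =====
def Claim_equal_get_cep_dn_from_ip_dn : Prop := ∀ (ip_dn : String), Dom_get_cep_dn_from_ip_dn ip_dn → Spec_get_cep_dn_from_ip_dn ip_dn (get_cep_dn_from_ip_dn ip_dn)

-- ===== LEMMAS AND PROOFS =====

-- common semantic skeleton: the answer determined by the list of '/'-separated segments
def pvG : List (List Char) → Option (List Char)
  | [] => none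
  | p :: ps =>
    if PySem.Chars.startswith p ['c', 'e', 'p', '-'] then some p
    else (pvG ps).map (fun t => p ++ '/' :: t)

-- PySem's fuel-based splitOn on a one-char separator is Mathlib's splitOnP
theorem pvSplitOn_go_eq (c : Char) (l : List Char) :
    ∀ (fuel : Nat) (cur : List Char) (acc : List (List Char)), l.length ≤ fuel →
      PySem.Chars.splitOn.go [c] fuel l cur acc
        = acc.reverse ++ (List.splitOnP (· == c) l).modifyHead (cur.reverse ++ ·) := by
  induction l with
  | nil =>
    intro fuel cur acc _
    cases fuel <;> simp [PySem.Chars.splitOn.go, List.splitOnP_nil]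
  | cons a as ih =>
    intro fuel cur acc hf
    cases fuel with
    | zero => simp at hf
    | succ f =>
      simp only [PySem.Chars.splitOn.go]
      by_cases hc : a = c
      · subst hc
        simp only [List.isPrefixOf, beq_self_eq_true, Bool.true_and,
          if_pos]
        rw [show List.drop ([a].length) (a :: as) = as from rfl]
        rw [ih f [] (cur.reverse :: acc) (by simpa using Nat.le_of_succ_le_succ hf)]
        simp [List.splitOnP_cons, List.modifyHead]
        cases h : List.splitOnP (· == a) as <;> simp
      · have : ([c].isPrefixOf (a :: as)) = false := by
          simp [List.isPrefixOf]; exact fun h => absurd h.symm hc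
        rw [this]
        simp only [Bool.false_eq_true, if_false]
        rw [ih f (a :: cur) acc (Nat.le_of_succ_le_succ hf)]
        have hne : (a == c) = false := by simp [hc]
        simp only [List.splitOnP_cons, hne, Bool.false_eq_true, if_false]
        congr 1
        cases h : List.splitOnP (· == c) as with
        | nil => exact absurd h (List.splitOnP_ne_nil _ _)
        | cons q qs => simp [List.modifyHead]

theorem pvSplitOn_eq (c : Char) (s : List Char) :
    PySem.Chars.splitOn s [c] = List.splitOnP (· == c) s := by
  have := pvSplitOn_go_eq c s (s.length + 1) [] [] (by omega)
  simp only [PySem.Chars.splitOn, this, List.reverse_nil, List.nil_append]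
  cases h : List.splitOnP (· == c) s with
  | nil => exact absurd h (List.splitOnP_ne_nil _ _)
  | cons q qs => simp [List.modifyHead]

-- when no '/' occurs, the split is the whole string
theorem pvSplit_neg (cs : List Char) (h : PySem.Chars.find cs ['/'] = -1) :
    List.splitOnP (· == '/') cs = [cs] := by
  apply List.splitOnP_eq_single
  intro x hx hxc
  have : ['/'] <:+: cs := by
    have hx' : x = '/' := by simpa using hxc
    exact (List.singleton_infix_iff _ _).mpr (hx' ▸ hx)
  exact absurd h ((not_iff_not.mpr (PySem.Chars.find_eq_neg_one_iff cs ['/'])).mpr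
    (not_not_intro this))

-- the first '/' found at index k: cs[k] = '/', nothing before, and the split peels take k
theorem pvFind_slash (cs : List Char) (h : 0 ≤ PySem.Chars.find cs ['/']) :
    (PySem.Chars.find cs ['/']).toNat < cs.length ∧
    cs[(PySem.Chars.find cs ['/']).toNat]? = some '/' ∧
    (∀ x ∈ cs.take (PySem.Chars.find cs ['/']).toNat, x ≠ '/') := by
  obtain ⟨hpre, hmin⟩ := PySem.Chars.find_spec h
  set k := (PySem.Chars.find cs ['/']).toNat with hk
  have hlt : k < cs.length := by
    have h1 : 1 ≤ (cs.drop k).length := le_trans (by simp) hpre.length_le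
    simp only [List.length_drop] at h1
    omega
  refine ⟨hlt, ?_, ?_⟩
  · obtain ⟨t, ht⟩ := hpre
    rw [List.drop_eq_getElem_cons hlt] at ht
    have hck : cs[k] = '/' := by injection ht with h1 _; exact h1.symm
    simp [List.getElem?_eq_getElem hlt, hck]
  · intro x hx hxc
    obtain ⟨i, hi, hgi⟩ := List.getElem_of_mem hx
    have hik : i < k := by have := hi; simp [List.length_take] at this; omega
    have hicl : i < cs.length := by omega
    apply hmin i hik
    rw [List.drop_eq_getElem_cons hicl]
    rw [List.getElem_take] at hgi
    rw [hgi, hxc]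
    exact ⟨_, rfl⟩

theorem pvSplit_pos (cs : List Char) (h : 0 ≤ PySem.Chars.find cs ['/']) :
    List.splitOnP (· == '/') cs =
      cs.take (PySem.Chars.find cs ['/']).toNat ::
        List.splitOnP (· == '/') (cs.drop ((PySem.Chars.find cs ['/']).toNat + 1)) := by
  obtain ⟨hlt, hget, hnone⟩ := pvFind_slash cs h
  set k := (PySem.Chars.find cs ['/']).toNat with hk
  have hdecomp : cs = cs.take k ++ '/' :: cs.drop (k + 1) := by
    conv_lhs => rw [← List.take_append_drop k cs]
    rw [List.drop_eq_getElem_cons hlt]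
    have : cs[k] = '/' := by simpa [List.getElem?_eq_getElem hlt] using hget
    rw [this]
  conv_lhs => rw [hdecomp]
  exact List.splitOnP_first _ _ (fun x hx => by simpa using hnone x hx) '/' (by simp) _

-- the A side computes pvG of the parts
theorem pvALoop_spec (parts : List (List Char)) :
    ∀ (i : Int), 0 ≤ i →
      (pvALoop parts i = -1 ∧ pvG parts = none) ∨
      (∃ k : Nat, k < parts.length ∧ pvALoop parts i = i + k ∧
        pvG parts = some (PySem.Chars.join ['/'] (parts.take (k + 1)))) := by
  induction parts with
  | nil => intro i _; exact Or.inl ⟨rfl, rfl⟩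
  | cons p ps ih =>
    intro i hi
    by_cases hsw : PySem.Chars.startswith p ['c', 'e', 'p', '-'] = true
    · refine Or.inr ⟨0, by simp, ?_, ?_⟩
      · simp [pvALoop, hsw]
      · simp [pvG, hsw, PySem.Chars.join_singleton]
    · rcases ih (i + 1) (by omega) with ⟨h1, h2⟩ | ⟨k, hk, h1, h2⟩
      · exact Or.inl ⟨by simp [pvALoop, hsw, h1], by simp [pvG, hsw, h2]⟩
      · refine Or.inr ⟨k + 1, by simp; omega, ?_, ?_⟩
        · simp only [pvALoop, hsw, Bool.false_eq_true, if_false, h1]; push_cast; ring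
        · cases ps with
          | nil => simp at hk
          | cons q qs =>
            have hstep : pvG (p :: q :: qs) = (pvG (q :: qs)).map (fun t => p ++ '/' :: t) := by
              simp [pvG, hsw]
            rw [hstep, h2, Option.map_some]
            rw [show (p :: q :: qs).take (k + 1 + 1) = p :: q :: qs.take k by
              rw [List.take_succ_cons, List.take_succ_cons]]
            rw [show (q :: qs).take (k + 1) = q :: qs.take k from List.take_succ_cons]
            rw [PySem.Chars.join_cons_cons]
            simp

theorem pvA_eq (cs : List Char) :
    (let parts := PySem.Chars.splitOn cs ['/']
     let cep_index := pvALoop parts 0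
     if 0 ≤ cep_index then PySem.Chars.join ['/'] (parts.take (cep_index.toNat + 1)) else []) =
    (pvG (List.splitOnP (· == '/') cs)).getD [] := by
  simp only [pvSplitOn_eq]
  rcases pvALoop_spec (List.splitOnP (· == '/') cs) 0 le_rfl with ⟨h1, h2⟩ | ⟨k, _, h1, h2⟩
  · simp [h1, h2]
  · simp only [h1, h2, Int.zero_add]
    rw [if_pos (by omega)]
    simp

-- the B side computes pvG of the parts
theorem pvBGo_eq (pre rest : List Char) :
    pvBGo pre rest =
      (match pvG (List.splitOnP (· == '/') rest) with
       | some t => pre ++ t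
       | none => ([] : List Char)) := by
  induction pre, rest using pvBGo.induct with
  | case1 pre rest hsw =>
    rw [pvBGo]
    simp only [hsw, if_pos]
    by_cases hneg : PySem.Chars.find rest ['/'] = -1
    · rw [pvSplit_neg rest hneg]
      simp [pvG, hsw, hneg]
    · have h0 : 0 ≤ PySem.Chars.find rest ['/'] := by
        have := PySem.Chars.neg_one_le_find rest ['/']; omega
      rw [pvSplit_pos rest h0]
      have hk4 : 4 ≤ (PySem.Chars.find rest ['/']).toNat := by
        by_contra hlt
        obtain ⟨_, hget, _⟩ := pvFind_slash rest h0
        have hcp : (['c', 'e', 'p', '-'] : List Char) <+: rest :=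
          (PySem.Chars.startswith_iff _ _).mp hsw
        obtain ⟨t, ht⟩ := hcp
        set k := (PySem.Chars.find rest ['/']).toNat
        have hkk : k < 4 := by omega
        have : rest[k]? = (['c', 'e', 'p', '-'] : List Char)[k]? := by
          rw [← ht]; rw [List.getElem?_append_left (by simpa using hkk)]
        rw [hget] at this
        interval_cases k <;> simp_all
      have hswt : PySem.Chars.startswith
          (rest.take (PySem.Chars.find rest ['/']).toNat) ['c', 'e', 'p', '-'] = true := by
        rw [PySem.Chars.startswith_iff]
        exact List.prefix_take_iff.mpr ⟨(PySem.Chars.startswith_iff _ _).mp hsw, by simpa⟩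
      simp [pvG, hswt, hneg]
  | case2 pre rest hsw k hneg =>
    rw [pvBGo]
    simp only [hsw, Bool.false_eq_true, if_false]
    rw [dif_pos hneg, pvSplit_neg rest hneg]
    simp [pvG, hsw]
  | case3 pre rest hsw k hneg ih =>
    rw [pvBGo]
    simp only [hsw, Bool.false_eq_true, if_false]
    rw [dif_neg hneg]
    have h0 : 0 ≤ PySem.Chars.find rest ['/'] := by
      have := PySem.Chars.neg_one_le_find rest ['/']; omega
    rw [pvSplit_pos rest h0, ih]
    set kn := (PySem.Chars.find rest ['/']).toNat with hkn
    have hswt : PySem.Chars.startswith (rest.take kn) ['c', 'e', 'p', '-'] = false := by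
      by_contra hc
      have hc' : PySem.Chars.startswith (rest.take kn) ['c', 'e', 'p', '-'] = true := by
        simpa using hc
      have : (['c', 'e', 'p', '-'] : List Char) <+: rest :=
        ((List.prefix_take_iff).mp ((PySem.Chars.startswith_iff _ _).mp hc')).1
      rw [← PySem.Chars.startswith_iff] at this
      exact absurd this (by simp [hsw])
    have htake : rest.take (kn + 1) = rest.take kn ++ ['/'] := by
      obtain ⟨hlt, hget, -⟩ := pvFind_slash rest h0
      simp [List.take_succ, hkn, hget]
    simp only [pvG, hswt, Bool.false_eq_true, if_false]
    cases pvG (List.splitOnP (· == '/') (rest.drop (kn + 1))) with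
    | none => simp
    | some t => simp [htake]

-- ===== VERDICT (by name: the statement is the Claim_ definition above) =====
theorem get_cep_dn_from_ip_dn_spec : Claim_equal_get_cep_dn_from_ip_dn := by
  intro s _
  unfold Spec_get_cep_dn_from_ip_dn get_cep_dn_from_ip_dn get_cep_dn_from_ip_dn_alt
  rw [pvBGo_eq]
  have hA := pvA_eq s.toList
  simp only at hA
  by_cases h : (0 : Int) ≤ pvALoop (PySem.Chars.splitOn s.toList ['/']) 0
  · rw [if_pos h]
    rw [if_pos h] at hA
    rw [hA]
    cases pvG (List.splitOnP (· == '/') s.toList) <;> simp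
  · rw [if_neg h]
    rw [if_neg h] at hA
    cases hg : pvG (List.splitOnP (· == '/') s.toList) with
    | none => rfl
    | some t =>
      rw [hg] at hA
      simp only [Option.getD_some] at hA
      simp only [← hA, List.nil_append]
      rfl
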